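-- pv_equiv track=rewrite | github.com/krimeano/aoc-2025 | src/day_09/day_09.py | unzipped_coord_indexes
-- ===== SOURCE A (Python) =====
-- def unzipped_coord_indexes(values: list[int]) -> tuple[list[int], list[int]]:
--     ix = -1
--     prev_v = -1
--
--     vv = sorted(set(values))
--     kk = []
--     for v in vv:
--         ix += 1
--         if v - prev_v > 1:
--             ix += 1
--         kk.append(ix)
--         prev_v = v
--     return kk, vv
-- ===== SOURCE B (Python) =====
-- from bisect import bisect_right
--
--
-- def unzipped_coord_indexes(values: list[int]) -> tuple[list[int], list[int]]:
--     s = set(values)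
--     vv = sorted(s)
--     base = 1 if vv and vv[0] > 0 else 0
--     links = [j for j, u in enumerate(vv) if j > 0 and u - 1 in s]
--     kk = [2 * i + base - bisect_right(links, i) for i in range(len(vv))]
--     return kk, vv
-- ===== Notes on version B (the rewrite author's own statement) =====
-- stated objective: alternative
-- what changed: Replaced A's carried-accumulator loop (mutable ix/prev updated element by element) with a stateless per-element closed form: a sorted list of the gap-free positions is precomputed via enumerate and set membership (u-1 in s), and each index is kk[i] = 2*i + base - bisect_right(links, i); no state is carried between elements.
import Mathlib
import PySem

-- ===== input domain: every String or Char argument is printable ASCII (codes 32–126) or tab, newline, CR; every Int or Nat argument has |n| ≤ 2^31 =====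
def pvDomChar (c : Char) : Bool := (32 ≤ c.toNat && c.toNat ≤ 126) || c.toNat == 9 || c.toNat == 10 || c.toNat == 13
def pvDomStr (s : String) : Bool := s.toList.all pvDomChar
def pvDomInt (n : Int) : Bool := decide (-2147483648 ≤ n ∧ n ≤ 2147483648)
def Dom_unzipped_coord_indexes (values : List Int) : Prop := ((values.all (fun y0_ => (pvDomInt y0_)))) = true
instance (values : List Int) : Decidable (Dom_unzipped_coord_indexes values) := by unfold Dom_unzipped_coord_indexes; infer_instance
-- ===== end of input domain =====

-- B replaces A's carried ix/prev accumulator loop by a stateless per-element closed form: a precomputed sorted list of gap-free positions (set membership via enumerate) queried with bisect_right (alternative decomposition, same O(n log n) cost).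


-- ===== PORT A =====
-- A's loop: ix += 1; if v - prev_v > 1: ix += 1; kk.append(ix); prev_v = v
def pvALoop : Int → Int → List Int → List Int
  | _, _, [] => []
  | ix, prev, v :: rest =>
    let ix1 := ix + 1
    let ix2 := if v - prev > 1 then ix1 + 1 else ix1
    ix2 :: pvALoop ix2 v rest

def unzipped_coord_indexes (values : List Int) : List Int × List Int :=
  let vv := PySem.List.sorted (PySem.Set.ofList values) (fun x => x) false
  (pvALoop (-1) (-1) vv, vv)

-- ===== PORT B =====
-- B: s = set(values); vv = sorted(s); base = 1 if vv and vv[0] > 0 else 0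
--    links = [j for j, u in enumerate(vv) if j > 0 and u - 1 in s]
--    kk = [2*i + base - bisect_right(links, i) for i in range(len(vv))]
def pvBase : List Int → Int
  | [] => 0
  | v0 :: _ => if v0 > 0 then 1 else 0

def pvLinks (s : PySem.Set Int) (vv : List Int) : List Int :=
  ((PySem.List.enumerate vv).filter
    (fun ju => decide (ju.1 > 0) && PySem.Set.contains s (ju.2 - 1))).map (fun ju => ju.1)

def unzipped_coord_indexes_alt (values : List Int) : List Int × List Int :=
  let s := PySem.Set.ofList values
  let vv := PySem.List.sorted s (fun x => x) false
  let base : Int := pvBase vv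
  let links := pvLinks s vv
  let kk := (List.range vv.length).map (fun (i : Nat) =>
    2 * (i : Int) + base - (PySem.List.bisectRight links (i : Int) : Int))
  (kk, vv)

-- ===== PRECONDITION & SPEC =====
def Spec_unzipped_coord_indexes (values : List Int) (out : List Int × List Int) : Prop := out = unzipped_coord_indexes_alt values
instance (values : List Int) (out : List Int × List Int) : Decidable (Spec_unzipped_coord_indexes values out) := by unfold Spec_unzipped_coord_indexes; infer_instance

-- ===== CLAIM (what is proved, stated in full; the proofs are below) =====
def Claim_equal_unzipped_coord_indexes : Prop := ∀ (values : List Int), Dom_unzipped_coord_indexes values → Spec_unzipped_coord_indexes values (unzipped_coord_indexes values)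

-- ===== LEMMAS AND PROOFS =====

-- gap indicator at position j of vv, with sentinel predecessor prev at j = 0
def pvGapAt (prev : Int) (vv : List Int) (j : Nat) : Int :=
  if vv.getD j 0 - (if j = 0 then prev else vv.getD (j - 1) 0) > 1 then 1 else 0

-- number of gaps among the first k positions
def pvGcnt (prev : Int) (vv : List Int) (k : Nat) : Int :=
  ∑ j ∈ Finset.range k, pvGapAt prev vv j

lemma pvGapAt_shift (prev v : Int) (t : List Int) (j : Nat) :
    pvGapAt prev (v :: t) (j + 1) = pvGapAt v t j := by
  unfold pvGapAt
  cases j with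
  | zero => simp
  | succ m => simp [List.getD]

lemma pvGcnt_shift (prev v : Int) (t : List Int) (k : Nat) :
    pvGcnt prev (v :: t) (k + 1) = pvGapAt prev (v :: t) 0 + pvGcnt v t k := by
  unfold pvGcnt
  rw [Finset.sum_range_succ']
  simp [pvGapAt_shift]
  ring

lemma pvALoop_length (vv : List Int) : ∀ ix prev, (pvALoop ix prev vv).length = vv.length := by
  induction vv with
  | nil => intro ix prev; rfl
  | cons v t ih => intro ix prev; simp [pvALoop, ih]

lemma pvALoop_getElem (vv : List Int) : ∀ (ix prev : Int) (i : Nat), i < vv.length →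
    (pvALoop ix prev vv)[i]? = some (ix + (i + 1 : Nat) + pvGcnt prev vv (i + 1)) := by
  induction vv with
  | nil => intro ix prev i h; simp at h
  | cons v t ih =>
    intro ix prev i h
    cases i with
    | zero =>
      simp only [pvALoop, List.getElem?_cons_zero, Option.some.injEq]
      have : pvGcnt prev (v :: t) 1 = pvGapAt prev (v :: t) 0 := by
        unfold pvGcnt; simp
      rw [this]
      unfold pvGapAt
      simp only [List.getD]
      split_ifs <;> simp_all <;> omega
    | succ j =>
      simp only [pvALoop, List.getElem?_cons_succ]
      rw [ih _ v j (by simpa using h), pvGcnt_shift]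
      have hgap : pvGapAt prev (v :: t) 0 = if v - prev > 1 then 1 else 0 := by
        unfold pvGapAt; simp [List.getD]
      rw [hgap]
      split_ifs <;> push_cast <;> ring_nf

-- crux: in a strictly increasing list, v-1 is a member iff v is adjacent to its predecessor
lemma mem_pred_iff (vv : List Int) (hs : vv.Pairwise (· < ·)) (j : Nat)
    (hj0 : 0 < j) (hj : j < vv.length) :
    (vv.getD j 0 - 1 ∈ vv) ↔ vv.getD j 0 - vv.getD (j - 1) 0 ≤ 1 := by
  rw [List.pairwise_iff_getElem] at hs
  have hj1 : j - 1 < vv.length := by omega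
  have hlt : vv[j - 1] < vv[j] := hs (j - 1) j hj1 hj (by omega)
  rw [List.getD_eq_getElem _ _ hj, List.getD_eq_getElem _ _ hj1]
  constructor
  · intro hmem
    obtain ⟨k, hk, hke⟩ := List.mem_iff_getElem.mp hmem
    have hkj : k < j := by
      by_contra hge
      have : vv[j] ≤ vv[k] := by
        rcases Nat.eq_or_lt_of_le (Nat.le_of_not_lt hge) with h | h
        · subst h; omega
        · exact le_of_lt (hs j k hj hk h)
      omega
    have : vv[k] ≤ vv[j - 1] := by
      rcases Nat.eq_or_lt_of_le (Nat.le_of_lt_succ (by omega : k < (j - 1) + 1)) with h | h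
      · subst h; omega
      · exact le_of_lt (hs k (j - 1) hk hj1 h)
    omega
  · intro hle
    have : vv[j - 1] = vv[j] - 1 := by omega
    rw [← this]
    exact List.mem_iff_getElem.mpr ⟨j - 1, hj1, rfl⟩

-- count in B's comprehension, in drop/take form
def pvCnt (vv : List Int) (i : Nat) : Nat :=
  (((vv.drop 1).take i).filter (fun u => decide (u - 1 ∈ vv))).length

lemma pvCnt_succ (vv : List Int) (i : Nat) (h : i + 1 < vv.length) :
    pvCnt vv (i + 1) = pvCnt vv i + (if vv.getD (i + 1) 0 - 1 ∈ vv then 1 else 0) := by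
  unfold pvCnt
  have hi : i < (vv.drop 1).length := by simp; omega
  rw [List.take_succ, List.getElem?_eq_getElem hi]
  have hget : (vv.drop 1)[i] = vv.getD (i + 1) 0 := by
    rw [List.getElem_drop, List.getD_eq_getElem _ _ h]
    congr 1
    omega
  simp only [Option.toList_some, List.filter_append, List.length_append, List.filter_cons,
    List.filter_nil, hget, List.getD]
  split_ifs <;> simp_all

-- the per-index identity between A's carried count and B's closed form
lemma gcnt_eq_closed (vv : List Int) (hs : vv.Pairwise (· < ·)) :
    ∀ i, i < vv.length →
      pvGcnt (-1) vv (i + 1) = pvBase vv + i - pvCnt vv i := by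
  intro i
  induction i with
  | zero =>
    intro h
    cases vv with
    | nil => simp at h
    | cons v t =>
      have h1 : pvGcnt (-1) (v :: t) 1 = pvGapAt (-1) (v :: t) 0 := by
        unfold pvGcnt; simp
      have h2 : pvCnt (v :: t) 0 = 0 := by
        unfold pvCnt; simp
      have h3 : pvGapAt (-1) (v :: t) 0 = if v - -1 > 1 then 1 else 0 := rfl
      rw [h1, h2, h3]
      show (if v - -1 > 1 then (1 : Int) else 0)
          = (if v > 0 then (1 : Int) else 0) + ((0 : Nat) : Int) - ((0 : Nat) : Int)
      push_cast
      split_ifs <;> omega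
  | succ j ihj =>
    intro h
    have hj : j < vv.length := by omega
    rw [pvCnt_succ vv j h]
    have hstep : pvGcnt (-1) vv (j + 1 + 1) = pvGcnt (-1) vv (j + 1) + pvGapAt (-1) vv (j + 1) := by
      unfold pvGcnt; rw [Finset.sum_range_succ]
    rw [hstep, ihj hj]
    have hmem := mem_pred_iff vv hs (j + 1) (by omega) h
    simp only [Nat.add_sub_cancel] at hmem
    have hgap : pvGapAt (-1) vv (j + 1) = if vv.getD (j + 1) 0 - vv.getD j 0 > 1 then 1 else 0 := by
      unfold pvGapAt; simp
    rw [hgap]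
    by_cases hm : vv.getD (j + 1) 0 - 1 ∈ vv
    · have := hmem.mp hm
      rw [if_pos hm, if_neg (by omega)]
      push_cast; ring
    · have : ¬ vv.getD (j + 1) 0 - vv.getD j 0 ≤ 1 := fun hle => hm (hmem.mpr hle)
      rw [if_neg hm, if_pos (by omega)]
      push_cast; ring

-- pvLinks is strictly increasing
lemma pvLinks_pairwise (s : PySem.Set Int) (vv : List Int) :
    (pvLinks s vv).Pairwise (· < ·) := by
  unfold pvLinks
  rw [List.pairwise_map]
  exact List.Pairwise.filter _ (PySem.List.pairwise_lt_enumerate vv 0)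

lemma pvLinks_pos (s : PySem.Set Int) (vv : List Int) :
    ∀ x ∈ pvLinks s vv, 0 < x := by
  intro x hx
  unfold pvLinks at hx
  obtain ⟨ju, hju, rfl⟩ := List.mem_map.mp hx
  have := (List.mem_filter.mp hju).2
  simp at this
  exact this.1

lemma mem_pvLinks (s : PySem.Set Int) (vv : List Int)
    (hc : ∀ u : Int, PySem.Set.contains s u = decide (u ∈ vv))
    (k : Nat) (hk : k < vv.length) (hk0 : 0 < k) :
    ((k : Int) ∈ pvLinks s vv) ↔ vv.getD k 0 - 1 ∈ vv := by
  unfold pvLinks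
  rw [List.getD_eq_getElem _ _ hk]
  constructor
  · intro hx
    obtain ⟨ju, hju, hfst⟩ := List.mem_map.mp hx
    obtain ⟨hmem, hcond⟩ := List.mem_filter.mp hju
    obtain ⟨m, hm, rfl⟩ := (PySem.List.mem_enumerate_iff vv 0 ju).mp hmem
    simp only [hc] at hcond
    simp at hcond hfst
    have : m = k := by omega
    subst this
    exact hcond.2
  · intro hmem
    refine List.mem_map.mpr ⟨((k : Int), vv[k]), List.mem_filter.mpr ?_, rfl⟩
    constructor
    · exact (PySem.List.mem_enumerate_iff vv 0 _).mpr ⟨k, hk, by simp⟩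
    · simp only [hc]
      simp
      exact ⟨by exact_mod_cast hk0, hmem⟩

-- Python's bisect_right on a ≤-sorted list counts the elements ≤ x
lemma bisect_eq_countP (xs : List Int) (x : Int) (hs : xs.Pairwise (· ≤ ·)) :
    PySem.List.bisectRight xs x = xs.countP (fun u => decide (u ≤ x)) := by
  obtain ⟨hle, h1, h2⟩ := PySem.List.bisectRight_spec xs x hs
  set r := PySem.List.bisectRight xs x with hr
  conv_rhs => rw [← List.take_append_drop r xs]
  rw [List.countP_append]
  have ht : (xs.take r).countP (fun u => decide (u ≤ x)) = (xs.take r).length := by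
    rw [List.countP_eq_length]
    intro u hu
    obtain ⟨j, hj, hju⟩ := List.mem_iff_getElem.mp hu
    have hjr : j < r := by
      have := hj; simp [List.length_take] at this; omega
    have hjlen : j < xs.length := by omega
    have : (xs.take r)[j] = xs[j] := List.getElem_take
    rw [this] at hju
    subst hju
    simpa using h1 j hjlen hjr
  have hd : (xs.drop r).countP (fun u => decide (u ≤ x)) = 0 := by
    rw [List.countP_eq_zero]
    intro u hu
    obtain ⟨j, hj, hju⟩ := List.mem_iff_getElem.mp hu
    have hjlen : r + j < xs.length := by
      have := hj; simp [List.length_drop] at this; omega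
    have : (xs.drop r)[j] = xs[r + j] := List.getElem_drop ..
    rw [this] at hju
    subst hju
    have := h2 (r + j) hjlen (by omega)
    simp
    omega
  rw [ht, hd, List.length_take]
  omega

-- counting ≤ k+1 splits into counting ≤ k plus occurrences of k+1 (any list)
lemma countP_le_succ (l : List Int) (k : Int) :
    l.countP (fun u => decide (u ≤ k + 1)) = l.countP (fun u => decide (u ≤ k)) + l.count (k + 1) := by
  induction l with
  | nil => simp
  | cons a t ih =>
    simp only [List.countP_cons, List.count_cons, ih]
    split_ifs <;> simp_all <;> omega

-- bisect's count over the link positions equals the prefix count of B's old combinatorial form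
lemma bisect_eq_pvCnt (s : PySem.Set Int) (vv : List Int)
    (hc : ∀ u : Int, PySem.Set.contains s u = decide (u ∈ vv)) :
    ∀ i : Nat, i < vv.length →
      (pvLinks s vv).countP (fun u => decide (u ≤ (i : Int))) = pvCnt vv i := by
  intro i
  induction i with
  | zero =>
    intro _
    have h0 : (pvLinks s vv).countP (fun u => decide (u ≤ (0 : Int))) = 0 := by
      rw [List.countP_eq_zero]
      intro u hu
      have := pvLinks_pos s vv u hu
      simp
      omega
    have h1 : pvCnt vv 0 = 0 := by unfold pvCnt; simp
    simp [h0, h1]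
  | succ j ihj =>
    intro h
    have hj : j < vv.length := by omega
    have hcast : ((j + 1 : Nat) : Int) = (j : Int) + 1 := by push_cast; ring
    rw [hcast, countP_le_succ, ihj hj, pvCnt_succ vv j h]
    congr 1
    have hnodup : (pvLinks s vv).Nodup :=
      (pvLinks_pairwise s vv).imp (fun {a b} hab => ne_of_lt hab)
    have hmem := mem_pvLinks s vv hc (j + 1) h (by omega)
    have hcast2 : ((j : Int) + 1) = ((j + 1 : Nat) : Int) := by push_cast; ring
    rw [hcast2]
    by_cases hm : vv.getD (j + 1) 0 - 1 ∈ vv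
    · rw [if_pos hm]
      exact List.count_eq_one_of_mem hnodup (hmem.mpr hm)
    · rw [if_neg hm]
      exact List.count_eq_zero_of_not_mem (fun hx => hm (hmem.mp hx))

-- A's loop equals B's closed-form map, for a strictly sorted vv whose membership matches s
lemma pvMain (s : PySem.Set Int) (vv : List Int) (hs : vv.Pairwise (· < ·))
    (hc : ∀ u : Int, PySem.Set.contains s u = decide (u ∈ vv)) :
    pvALoop (-1) (-1) vv = (List.range vv.length).map (fun (i : Nat) =>
      2 * (i : Int) + pvBase vv - (PySem.List.bisectRight (pvLinks s vv) (i : Int) : Int)) := by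
  apply List.ext_getElem?
  intro i
  by_cases hi : i < vv.length
  · rw [pvALoop_getElem vv (-1) (-1) i hi, List.getElem?_map, List.getElem?_range hi]
    simp only [Option.map_some, Option.some.injEq]
    rw [bisect_eq_countP _ _ ((pvLinks_pairwise s vv).imp (fun {a b} hab => le_of_lt hab)),
      bisect_eq_pvCnt s vv hc i hi, gcnt_eq_closed vv hs i hi]
    push_cast
    ring
  · rw [List.getElem?_eq_none, List.getElem?_eq_none]
    · simp; omega
    · rw [pvALoop_length]; omega

-- ===== VERDICT (by name: the statement is the Claim_ definition above) =====
theorem unzipped_coord_indexes_spec : Claim_equal_unzipped_coord_indexes := by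
  intro values _
  unfold Spec_unzipped_coord_indexes
  have hA : unzipped_coord_indexes values =
      (pvALoop (-1) (-1) (PySem.List.sorted (PySem.Set.ofList values) (fun x => x) false),
       PySem.List.sorted (PySem.Set.ofList values) (fun x => x) false) := rfl
  have hB : unzipped_coord_indexes_alt values =
      ((List.range (PySem.List.sorted (PySem.Set.ofList values) (fun x => x) false).length).map
        (fun (i : Nat) =>
          2 * (i : Int) + pvBase (PySem.List.sorted (PySem.Set.ofList values) (fun x => x) false)
            - (PySem.List.bisectRight
                (pvLinks (PySem.Set.ofList values)
                  (PySem.List.sorted (PySem.Set.ofList values) (fun x => x) false)) (i : Int) : Int)),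
       PySem.List.sorted (PySem.Set.ofList values) (fun x => x) false) := rfl
  rw [hA, hB, pvMain (PySem.Set.ofList values) _
    (PySem.List.sorted_ofList_pairwise_lt values)
    (fun u => by simp [PySem.List.mem_sorted])]
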